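-- pv_equiv track=rewrite | github.com/harwinder-ux/PYTHON | HARWINDER SINGH 01.py | classify_number
-- ===== SOURCE A (Python) =====
-- def is_prime(n):
--     if n <= 1:
--         return False
--     for i in range(2, int(n**0.5) + 1):
--         if n % i == 0:
--             return False
--     return True
--
-- def classify_number(n):
--     classification = {}
--
--     # Positive / Negative / Zero
--     if n > 0:
--         classification["sign"] = "Positive"
--     elif n < 0:
--         classification["sign"] = "Negative"
--     else:
--         classification["sign"] = "Zero"
--         classification["prime"] = "Not Applicable"
--         classification["perfect"] = "Not Applicable"
--         classification["even_odd"] = "Even"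
--         return classification
--
--     # Even / Odd
--     classification["even_odd"] = "Even" if n % 2 == 0 else "Odd"
--
--     # Prime / Composite
--     if is_prime(n):
--         classification["prime"] = "Prime"
--     else:
--         classification["prime"] = "Composite"
--
--     # Perfect / Abundant / Deficient
--     sum_div = 1
--     for i in range(2, int(n**0.5) + 1):
--         if n % i == 0:
--             sum_div += i
--             if n // i != i:
--                 sum_div += n // i
--
--     if n == 1:
--         classification["perfect"] = "Deficient"
--     else:
--         if sum_div == n:
--             classification["perfect"] = "Perfect"
--         elif sum_div > n:
--             classification["perfect"] = "Abundant"
--         else: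
--             classification["perfect"] = "Deficient"
--
--     return classification
-- ===== SOURCE B (Python) =====
-- def classify_number(n):
--     if n == 0:
--         return {"sign": "Zero", "prime": "Not Applicable",
--                 "perfect": "Not Applicable", "even_odd": "Even"}
--     # sigma(n) = product over prime powers p^e || n of (p^(e+1) - 1) // (p - 1)
--     m = n
--     sigma = 1
--     p = 2
--     while p * p <= m:
--         if m % p == 0:
--             q = p
--             while m % p == 0:
--                 m //= p
--                 q *= p
--             sigma *= (q - 1) // (p - 1)
--         p += 1
--     if m > 1:
--         sigma *= m + 1
--     s = sigma - n  # sum of proper divisors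
--     return {"sign": "Positive" if n > 0 else "Negative",
--             "even_odd": "Even" if n % 2 == 0 else "Odd",
--             "prime": "Prime" if s == 1 else "Composite",
--             "perfect": "Perfect" if s == n else "Abundant" if s > n else "Deficient"}
-- ===== Notes on version B (the rewrite author's own statement) =====
-- stated objective: alternative
-- what changed: Replaces A's two trial-division scans (the is_prime helper and the paired i,n//i divisor-sum loop with its n==1 special case) by prime factorisation: sigma(n) is computed as the product of (p^(e+1)-1)//(p-1) over the prime powers of n, the proper-divisor sum is sigma(n)-n, and primality is read off as that sum being exactly 1.
import Mathlib
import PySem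

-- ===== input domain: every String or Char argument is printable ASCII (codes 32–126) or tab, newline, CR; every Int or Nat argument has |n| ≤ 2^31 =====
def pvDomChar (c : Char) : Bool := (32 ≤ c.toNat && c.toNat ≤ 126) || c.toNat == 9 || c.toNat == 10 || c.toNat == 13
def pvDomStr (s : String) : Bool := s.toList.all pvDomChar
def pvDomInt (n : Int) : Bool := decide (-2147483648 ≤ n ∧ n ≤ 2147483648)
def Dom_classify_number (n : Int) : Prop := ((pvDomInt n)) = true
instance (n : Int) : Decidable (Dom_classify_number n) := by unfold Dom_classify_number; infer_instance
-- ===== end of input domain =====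

-- B replaces A's trial-division scans (is_prime plus the paired i, n//i divisor-sum loop)
-- by prime factorisation: sigma(n) = prod over p^e || n of (p^(e+1)-1)/(p-1), the proper
-- divisor sum is sigma(n) - n, and primality is read off as that sum being 1.
-- Return value only; neither version mutates anything.

-- ===== PORT A =====
-- int(n**0.5): exact = Nat.sqrt for 0 ≤ n ≤ 2^31 (float sqrt is correctly rounded there and
-- cannot cross an integer); negative n raises (complex) and is excluded by Pre_.
def pyIsqrt (n : Int) : Int := Int.ofNat (Nat.sqrt n.toNat)

-- 'for i in …: if n % i == 0: return False / return True'
def isPrimeLoop (n : Int) : List Int → Bool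
  | [] => true
  | i :: rest => if PySem.Int.mod n i == 0 then false else isPrimeLoop n rest

def is_prime (n : Int) : Bool :=
  if n ≤ 1 then false
  else isPrimeLoop n (PySem.List.pyRange 2 (pyIsqrt n + 1) 1)

-- the part of A after the sign branch (A sets "sign" first, then continues identically)
def classifyRestA (n : Int) (sign : String) : List (String × String) :=
  let even_odd := if PySem.Int.mod n 2 == 0 then "Even" else "Odd"
  let prime := if is_prime n then "Prime" else "Composite"
  let sum_div := (PySem.List.pyRange 2 (pyIsqrt n + 1) 1).foldl
    (fun s i =>
      if PySem.Int.mod n i == 0 then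
        if PySem.Int.floordiv n i ≠ i then s + i + PySem.Int.floordiv n i else s + i
      else s) 1
  let perfect :=
    if n == 1 then "Deficient"
    else if sum_div == n then "Perfect"
    else if sum_div > n then "Abundant"
    else "Deficient"
  [("sign", sign), ("even_odd", even_odd), ("prime", prime), ("perfect", perfect)]

def classify_number (n : Int) : List (String × String) :=
  if n > 0 then classifyRestA n "Positive"
  else if n < 0 then classifyRestA n "Negative"
  else [("sign", "Zero"), ("prime", "Not Applicable"),
        ("perfect", "Not Applicable"), ("even_odd", "Even")]

-- ===== PORT B =====
-- inner 'while m % p == 0: m //= p; q *= p' of Source B, with a fuel bound that only makes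
-- the recursion total/structural (fuel m.toNat+1 exceeds the number of divisions performed)
def innerLoopF : Nat → Int → Int → Int → Int × Int
  | 0, _p, m, q => (m, q)
  | f + 1, p, m, q =>
    if PySem.Int.mod m p == 0 then innerLoopF f p (PySem.Int.floordiv m p) (q * p)
    else (m, q)

def innerLoop (p m q : Int) : Int × Int := innerLoopF (m.toNat + 1) p m q

-- outer 'while p * p <= m:' of Source B, returning the final (m, sigma); fuel again only a
-- totality bound (the loop runs at most m + 2 - p times, p increasing, m non-increasing)
def sigmaLoopF : Nat → Int → Int → Int → Int × Int
  | 0, _p, m, sigma => (m, sigma)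
  | f + 1, p, m, sigma =>
    if p * p ≤ m then
      if PySem.Int.mod m p == 0 then
        let r := innerLoop p m p
        sigmaLoopF f (p + 1) r.1 (sigma * PySem.Int.floordiv (r.2 - 1) (p - 1))
      else sigmaLoopF f (p + 1) m sigma
    else (m, sigma)

def sigmaLoop (p m sigma : Int) : Int × Int := sigmaLoopF (m + 2 - p).toNat p m sigma

def classify_number_alt (n : Int) : List (String × String) :=
  if n == 0 then
    [("sign", "Zero"), ("prime", "Not Applicable"),
     ("perfect", "Not Applicable"), ("even_odd", "Even")]
  else
    let r := sigmaLoop 2 n 1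
    let sigma := if r.1 > 1 then r.2 * (r.1 + 1) else r.2
    let s := sigma - n
    [("sign", if n > 0 then "Positive" else "Negative"),
     ("even_odd", if PySem.Int.mod n 2 == 0 then "Even" else "Odd"),
     ("prime", if s == 1 then "Prime" else "Composite"),
     ("perfect", if s == n then "Perfect" else if s > n then "Abundant" else "Deficient")]

-- ===== PRECONDITION & SPEC =====
-- Pre_ excludes exactly the inputs where A raises: for n < 0, int(n**0.5) receives a complex
-- number and raises TypeError.
def Pre_classify_number (n : Int) : Prop := 0 ≤ n
instance (n : Int) : Decidable (Pre_classify_number n) := by unfold Pre_classify_number; infer_instance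
def pvWitness_classify_number : Int := 28

def Spec_classify_number (n : Int) (out : List (String × String)) : Prop := out = classify_number_alt n
instance (n : Int) (out : List (String × String)) : Decidable (Spec_classify_number n out) := by unfold Spec_classify_number; infer_instance

-- ===== CLAIM =====
def Claim_equal_classify_number : Prop := ∀ (n : Int), Dom_classify_number n → Pre_classify_number n → Spec_classify_number n (classify_number n)

-- ===== LEMMAS AND PROOFS =====

def finishSigma (r : Int × Int) : Int := if r.1 > 1 then r.2 * (r.1 + 1) else r.2

-- A's early-return trial-division loop answers "no divisor in the list".
theorem isPrimeLoop_eq_not_any (n : Int) (l : List Int) :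
    isPrimeLoop n l = !(l.any fun i => PySem.Int.mod n i == 0) := by
  induction l with
  | nil => rfl
  | cons i rest ih =>
    simp only [isPrimeLoop, List.any_cons]
    by_cases h : PySem.Int.mod n i == 0 <;> simp [h, ih]

-- fold of a conditional add = init + sum of the mapped contributions
theorem foldl_if_add (c : Int → Bool) (g : Int → Int) (l : List Int) (init : Int) :
    l.foldl (fun s i => if c i then s + g i else s) init
      = init + (l.map fun i => if c i then g i else 0).sum := by
  induction l generalizing init with
  | nil => simp
  | cons i rest ih =>
    rw [List.foldl_cons, ih]
    by_cases h : c i <;> simp [h, add_assoc]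

-- list-range sum = Finset.range sum
theorem sum_map_range (k : ℕ) (F : ℕ → ℤ) :
    ((List.range k).map F).sum = ∑ i ∈ Finset.range k, F i := by
  induction k with
  | zero => simp
  | succ k ih =>
    rw [List.range_succ, Finset.sum_range_succ, List.map_append, List.sum_append]
    simp [ih]

theorem noDiv_py (a b m : ℕ) :
    (∀ i ∈ PySem.List.pyRange (a:ℤ) (b:ℤ) 1, ¬ (PySem.Int.mod (m:ℤ) i = 0)) ↔
      ∀ i : ℕ, a ≤ i → i < b → ¬ i ∣ m := by
  constructor
  · intro h i hai hib hdvd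
    refine h (i:ℤ) ?_ ?_
    · rw [PySem.List.mem_pyRange_one]
      exact ⟨by exact_mod_cast hai, by exact_mod_cast hib⟩
    · rw [PySem.Int.mod_eq_zero_iff_dvd]
      exact_mod_cast hdvd
  · intro h i hi hmod
    rw [PySem.List.mem_pyRange_one] at hi
    obtain ⟨hai, hib⟩ := hi
    have h0 : (0:ℤ) ≤ i := le_trans (by exact_mod_cast Nat.zero_le a) hai
    lift i to ℕ using h0 with j
    refine h j (by exact_mod_cast hai) (by exact_mod_cast hib) ?_
    rw [PySem.Int.mod_eq_zero_iff_dvd] at hmod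
    exact_mod_cast hmod

theorem pyIsqrt_natCast (m : ℕ) : pyIsqrt (m:ℤ) = ((m.sqrt : ℕ) : ℤ) := by
  simp [pyIsqrt]

-- the √n pairing identity: 1 + Σ_{2≤i≤√m, i∣m} (i + m/i unless m/i=i)  =  Σ_{d∣m, d<m} d
theorem sqrt_pairing (m : ℕ) (hm : 2 ≤ m) :
    1 + ∑ i ∈ Finset.Ico 2 (m.sqrt + 1),
        (if i ∣ m then (if m / i ≠ i then (i : ℤ) + (m / i : ℕ) else (i : ℤ)) else 0)
      = ∑ d ∈ Finset.Ico 1 m, (if d ∣ m then (d : ℤ) else 0) := by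
  set s := m.sqrt with hs
  have hm0 : 0 < m := by omega
  have hs1 : 1 ≤ s := by rw [hs, Nat.le_sqrt]; omega
  have hsm : s + 1 ≤ m := Nat.sqrt_lt_self (by omega)
  have hss : s * s ≤ m := by have := Nat.sqrt_le' m; simpa [pow_two, ← hs] using this
  have hlt : m < (s + 1) * (s + 1) := by
    have := Nat.lt_succ_sqrt' m; simpa [pow_two, ← hs, Nat.succ_eq_add_one] using this
  rw [← Finset.sum_Ico_consecutive (fun d => if d ∣ m then (d:ℤ) else 0)
        (show (1:ℕ) ≤ 2 by omega) (show (2:ℕ) ≤ m by omega),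
      ← Finset.sum_Ico_consecutive (fun d => if d ∣ m then (d:ℤ) else 0)
        (show (2:ℕ) ≤ s + 1 by omega) hsm]
  have hIco12 : ∑ d ∈ Finset.Ico 1 2, (if d ∣ m then (d:ℤ) else 0) = 1 := by
    have : Finset.Ico 1 2 = {1} := by decide
    rw [this, Finset.sum_singleton, if_pos (one_dvd m)]; norm_num
  rw [hIco12]
  have hsplit : ∀ i ∈ Finset.Ico 2 (s+1),
      (if i ∣ m then (if m / i ≠ i then (i:ℤ) + (m / i : ℕ) else (i:ℤ)) else 0)
        = (if i ∣ m then (i:ℤ) else 0) + (if i ∣ m ∧ m / i ≠ i then ((m / i : ℕ) : ℤ) else 0) := by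
    intro i _
    by_cases h1 : i ∣ m
    · by_cases h2 : m / i ≠ i <;> simp [h1, h2]
    · simp [h1]
  rw [Finset.sum_congr rfl hsplit, Finset.sum_add_distrib]
  have hZY : (∑ i ∈ Finset.Ico 2 (s+1), if i ∣ m ∧ m / i ≠ i then ((m / i : ℕ) : ℤ) else 0)
      = ∑ d ∈ Finset.Ico (s+1) m, (if d ∣ m then (d:ℤ) else 0) := by
    rw [← Finset.sum_filter, ← Finset.sum_filter]
    refine Finset.sum_nbij' (fun i => m / i) (fun d => m / d) ?_ ?_ ?_ ?_ ?_
    · intro i hi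
      simp only [Finset.mem_filter, Finset.mem_Ico] at hi ⊢
      obtain ⟨⟨h2i, his⟩, hdvd, hne⟩ := hi
      refine ⟨⟨?_, Nat.div_lt_self hm0 (by omega)⟩, Nat.div_dvd_of_dvd hdvd⟩
      by_contra hle
      push Not at hle
      have hile : i ≤ s := by omega
      have hqle : m / i ≤ s := by omega
      have hmie : i * (m / i) = m := Nat.mul_div_cancel' hdvd
      rcases lt_or_gt_of_ne hne with h | h
      · nlinarith
      · nlinarith
    · intro d hd
      simp only [Finset.mem_filter, Finset.mem_Ico] at hd ⊢
      obtain ⟨⟨hsd, hdm⟩, hdvd⟩ := hd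
      have hd0 : 0 < d := by omega
      have hdd : d * (m / d) = m := Nat.mul_div_cancel' hdvd
      have hq1 : 1 ≤ m / d := (Nat.one_le_div_iff hd0).mpr (by omega)
      have hqne : m / d ≠ 1 := by
        intro h; rw [h, mul_one] at hdd; omega
      have hqs : m / d ≤ s := by
        have h1 : m / d ≤ m / (s + 1) := Nat.div_le_div_left (by omega) (by omega)
        have h2 : m / (s + 1) < s + 1 := (Nat.div_lt_iff_lt_mul (by omega)).mpr hlt
        omega
      have hrec : m / (m / d) = d := Nat.div_div_self hdvd (by omega)
      exact ⟨⟨by omega, by omega⟩, Nat.div_dvd_of_dvd hdvd, by omega⟩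
    · intro i hi
      simp only [Finset.mem_filter, Finset.mem_Ico] at hi
      exact Nat.div_div_self hi.2.1 (by omega)
    · intro d hd
      simp only [Finset.mem_filter, Finset.mem_Ico] at hd
      exact Nat.div_div_self hd.2 (by omega)
    · intro i _; rfl
  rw [hZY]

-- A's fold over the √n range = the proper-divisor sum
theorem A_fold_sum (m : ℕ) (hm : 2 ≤ m) :
    (PySem.List.pyRange 2 (pyIsqrt (m:ℤ) + 1) 1).foldl
      (fun s i => if PySem.Int.mod (m:ℤ) i == 0 then
          if PySem.Int.floordiv (m:ℤ) i ≠ i then s + i + PySem.Int.floordiv (m:ℤ) i else s + i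
        else s) 1
    = ∑ d ∈ Finset.Ico 1 m, (if d ∣ m then (d:ℤ) else 0) := by
  have hbody : (fun (s i : ℤ) => if PySem.Int.mod (m:ℤ) i == 0 then
          if PySem.Int.floordiv (m:ℤ) i ≠ i then s + i + PySem.Int.floordiv (m:ℤ) i else s + i
        else s)
      = fun (s i : ℤ) => if PySem.Int.mod (m:ℤ) i == 0 then
          s + (if PySem.Int.floordiv (m:ℤ) i ≠ i then i + PySem.Int.floordiv (m:ℤ) i else i)
        else s := by
    funext s i; split_ifs <;> ring
  rw [hbody, foldl_if_add, ← sqrt_pairing m hm]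
  congr 1
  rw [pyIsqrt_natCast, PySem.List.pyRange_one]
  have hlen : (((m.sqrt:ℕ):ℤ) + 1 - 2).toNat = m.sqrt + 1 - 2 := by omega
  rw [hlen, List.map_map, sum_map_range, Finset.sum_Ico_eq_sum_range]
  apply Finset.sum_congr rfl
  intro k _
  simp only [Function.comp_apply]
  have hcast : (2:ℤ) + (k:ℤ) = ((2+k : ℕ) : ℤ) := by push_cast; ring
  rw [hcast]
  have hfd : PySem.Int.floordiv (m:ℤ) ((2+k:ℕ):ℤ) = ((m/(2+k) : ℕ) : ℤ) :=
    PySem.Int.floordiv_natCast m (2+k)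
  by_cases hd : (2+k) ∣ m
  · rw [if_pos (show (PySem.Int.mod (m:ℤ) ((2+k:ℕ):ℤ) == 0) = true by
        rw [beq_iff_eq, PySem.Int.mod_eq_zero_iff_dvd]; exact_mod_cast hd), if_pos hd, hfd]
    norm_cast
  · rw [if_neg (show ¬ ((PySem.Int.mod (m:ℤ) ((2+k:ℕ):ℤ) == 0) = true) by
        rw [beq_iff_eq, PySem.Int.mod_eq_zero_iff_dvd]; exact_mod_cast hd), if_neg hd]

-- the Ico sum is the proper-divisor sum
theorem Ico_propSum (m : ℕ) :
    (∑ d ∈ Finset.Ico 1 m, if d ∣ m then (d:ℤ) else 0)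
      = ((∑ d ∈ m.properDivisors, d : ℕ) : ℤ) := by
  rw [← Finset.sum_filter, Nat.cast_sum]
  rfl

-- A's primality test decides Nat.Prime (m ≥ 2)
theorem is_prime_true_iff (m : ℕ) (hm : 2 ≤ m) : is_prime (m:ℤ) = true ↔ m.Prime := by
  rw [is_prime, if_neg (show ¬ ((m:ℤ) ≤ 1) by exact_mod_cast (by omega : ¬ (m ≤ 1))),
      isPrimeLoop_eq_not_any]
  simp only [Bool.not_eq_true', List.any_eq_false]
  have e1 : PySem.List.pyRange 2 (pyIsqrt (m:ℤ) + 1) 1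
      = PySem.List.pyRange ((2:ℕ):ℤ) (((m.sqrt + 1 : ℕ)):ℤ) 1 := by
    rw [pyIsqrt_natCast]; norm_num
  rw [e1]
  constructor
  · intro h
    refine Nat.prime_def_le_sqrt.mpr ⟨hm, fun i h2 hle => ?_⟩
    refine (noDiv_py 2 (m.sqrt+1) m).mp ?_ i h2 (by omega)
    intro j hj hmod
    have := h j hj
    simp [hmod] at this
  · intro hpr i hi
    have hnd := (noDiv_py 2 (m.sqrt+1) m).mpr
      (fun j h2 hlt => (Nat.prime_def_le_sqrt.mp hpr).2 j h2 (by omega)) i hi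
    simpa using hnd

theorem exists_pow_decomp (p : ℕ) (hp : 2 ≤ p) :
    ∀ k, 1 ≤ k → ∃ e a, k = p ^ e * a ∧ ¬ p ∣ a := by
  intro k
  induction k using Nat.strong_induction_on with
  | _ k IH =>
    intro hk
    by_cases hd : p ∣ k
    · obtain ⟨k1, hk1⟩ := hd
      have hk11 : 1 ≤ k1 := by
        rcases Nat.eq_zero_or_pos k1 with h | h
        · subst h; simp at hk1; omega
        · exact h
      have hlt : k1 < k := by nlinarith
      obtain ⟨e, a, hea, hna⟩ := IH k1 hlt hk11
      exact ⟨e + 1, a, by rw [hk1, hea]; ring, hna⟩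
    · exact ⟨0, k, by simp, hd⟩

theorem innerLoopF_spec (p : ℕ) (hp : 2 ≤ p) :
    ∀ (e f a q : ℕ), e + 1 ≤ f → 1 ≤ a → ¬ p ∣ a →
      innerLoopF f ↑p ↑(p ^ e * a) ↑q = (↑a, ↑(q * p ^ e)) := by
  intro e
  induction e with
  | zero =>
    intro f a q hf ha hnd
    obtain ⟨f', rfl⟩ : ∃ f', f = f' + 1 := ⟨f - 1, by omega⟩
    rw [innerLoopF, if_neg]
    · simp
    · intro hmod
      rw [beq_iff_eq, PySem.Int.mod_eq_zero_iff_dvd] at hmod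
      have hpa : (p:ℕ) ∣ p ^ 0 * a := by exact_mod_cast hmod
      simp at hpa
      exact hnd hpa
  | succ e ihe =>
    intro f a q hf ha hnd
    obtain ⟨f', rfl⟩ : ∃ f', f = f' + 1 := ⟨f - 1, by omega⟩
    rw [innerLoopF, if_pos]
    · have hfd : PySem.Int.floordiv ↑(p ^ (e+1) * a) ↑p = ((p ^ e * a : ℕ) : ℤ) := by
        rw [PySem.Int.floordiv_natCast]
        congr 1
        rw [show p ^ (e+1) * a = p * (p ^ e * a) by ring, Nat.mul_div_cancel_left _ (by omega)]
      rw [hfd, show ((q:ℤ) * (p:ℤ)) = ((q * p : ℕ) : ℤ) by push_cast; ring,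
          ihe f' a (q * p) (by omega) ha hnd]
      congr 1
      push_cast
      ring
    · rw [beq_iff_eq, PySem.Int.mod_eq_zero_iff_dvd]
      exact_mod_cast (⟨p ^ e * a, by ring⟩ : (p:ℕ) ∣ p ^ (e+1) * a)

theorem innerLoop_spec (p : ℕ) (hp : 2 ≤ p) (e a q : ℕ) (ha : 1 ≤ a) (hnd : ¬ p ∣ a) :
    innerLoop ↑p ↑(p ^ e * a) ↑q = (↑a, ↑(q * p ^ e)) := by
  unfold innerLoop
  have htn : ((p ^ e * a : ℕ) : ℤ).toNat = p ^ e * a := by omega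
  rw [htn]
  refine innerLoopF_spec p hp e (p ^ e * a + 1) a q ?_ ha hnd
  have h1 : e < 2 ^ e := Nat.lt_two_pow_self
  have h2 : 2 ^ e ≤ p ^ e := Nat.pow_le_pow_left hp e
  have h3 : p ^ e ≤ p ^ e * a := Nat.le_mul_of_pos_right _ (by omega)
  omega

-- in trial division, a divisor found at p is prime (all smaller primes were removed)
theorem prime_of_min (p k : ℕ) (hp : 2 ≤ p) (hdvd : p ∣ k)
    (hfac : ∀ r : ℕ, r.Prime → r < p → ¬ r ∣ k) : p.Prime := by
  by_contra hnp
  have hmf := Nat.minFac_prime (show p ≠ 1 by omega)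
  have hle : p.minFac ≤ p := Nat.minFac_le (by omega)
  have hlt : p.minFac < p := by
    rcases Nat.lt_or_ge p.minFac p with h | h
    · exact h
    · have : p.minFac = p := by omega
      rw [this] at hmf
      exact absurd hmf hnp
  exact hfac p.minFac hmf hlt (dvd_trans (Nat.minFac_dvd p) hdvd)

-- the remainder after trial division up to √k is prime (k ≥ 2)
theorem prime_of_exit (k p : ℕ) (hk : 2 ≤ k) (hpp : k < p * p)
    (hfac : ∀ r : ℕ, r.Prime → r < p → ¬ r ∣ k) : k.Prime := by
  by_contra hnp
  have hmf := Nat.minFac_prime (show k ≠ 1 by omega)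
  have hsq : k.minFac ^ 2 ≤ k := Nat.minFac_sq_le_self (by omega) hnp
  have hlt : k.minFac < p := by nlinarith [sq_nonneg (k.minFac - p)]
  exact hfac k.minFac hmf hlt (Nat.minFac_dvd k)

theorem geom_mul (p e : ℕ) (hp : 1 ≤ p) :
    (p - 1) * (∑ i ∈ Finset.range (e+1), p ^ i) = p ^ (e+1) - 1 := by
  induction e with
  | zero => simp
  | succ e ih =>
    rw [Finset.sum_range_succ, Nat.mul_add, ih]
    have h1 : 1 ≤ p ^ (e+1) := Nat.one_le_pow _ _ (by omega)
    have h2 : (p - 1) * p ^ (e+1) = p * p ^ (e+1) - p ^ (e+1) := by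
      rw [Nat.sub_mul, one_mul]
    have h3 : p ^ (e+1+1) = p * p ^ (e+1) := by ring
    have h4 : p ^ (e+1) ≤ p * p ^ (e+1) := Nat.le_mul_of_pos_left _ (by omega)
    omega

-- loop exit: the remaining cofactor is 1 or prime, and finishSigma folds it in
theorem sigma_exit (p k : ℕ) (sigma : ℤ) (hk : 1 ≤ k) (hpp : k < p * p)
    (hfac : ∀ r : ℕ, r.Prime → r < p → ¬ r ∣ k) :
    finishSigma (↑k, sigma) = sigma * ↑(∑ d ∈ k.divisors, d) := by
  unfold finishSigma
  by_cases hk1 : k = 1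
  · subst hk1
    norm_num [Nat.divisors_one]
  · have hk2 : 2 ≤ k := by omega
    have hkp : k.Prime := prime_of_exit k p hk2 hpp hfac
    rw [if_pos (show ((k:ℕ):ℤ) > 1 by exact_mod_cast hk2)]
    rw [hkp.divisors, Finset.sum_pair (by omega : 1 ≠ k)]
    push_cast
    ring

-- the factorisation loop computes sigma multiplied onto the accumulator
theorem sigmaLoopF_sigma : ∀ (F p k : ℕ) (sigma : ℤ), k + 2 - p ≤ F → 2 ≤ p → 1 ≤ k →
    (∀ r : ℕ, r.Prime → r < p → ¬ r ∣ k) →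
    finishSigma (sigmaLoopF F ↑p ↑k sigma) = sigma * ↑(∑ d ∈ k.divisors, d) := by
  intro F
  induction F with
  | zero =>
    intro p k sigma hN hp hk hfac
    have hkp : k < p := by omega
    have hpp : k < p * p := by nlinarith
    rw [sigmaLoopF]
    exact sigma_exit p k sigma hk hpp hfac
  | succ F IH =>
    intro p k sigma hN hp hk hfac
    rw [sigmaLoopF]
    by_cases hstop : p * p ≤ k
    · have hple : p ≤ k := le_trans (Nat.le_mul_of_pos_left p (by omega)) hstop
      rw [if_pos (show ((p:ℤ) * (p:ℤ) ≤ (k:ℤ)) by exact_mod_cast hstop)]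
      by_cases hdvd : p ∣ k
      · have hppr : p.Prime := prime_of_min p k hp hdvd hfac
        obtain ⟨e, a, hka, hna⟩ := exists_pow_decomp p hp k hk
        have ha1 : 1 ≤ a := by
          rcases Nat.eq_zero_or_pos a with h | h
          · subst h; simp at hka; omega
          · exact h
        have he1 : 1 ≤ e := by
          rcases Nat.eq_zero_or_pos e with h | h
          · subst h; simp at hka; subst hka; exact absurd hdvd hna
          · exact h
        have hmodT : (PySem.Int.mod (k:ℤ) (p:ℤ) == 0) = true := by
          rw [beq_iff_eq, PySem.Int.mod_eq_zero_iff_dvd]; exact_mod_cast hdvd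
        rw [if_pos hmodT, show ((k:ℕ):ℤ) = ((p ^ e * a : ℕ) : ℤ) by rw [hka],
            innerLoop_spec p hp e a p ha1 hna]
        dsimp only
        set G := ∑ i ∈ Finset.range (e+1), p ^ i with hG
        have hfd : PySem.Int.floordiv (((p * p ^ e : ℕ) : ℤ) - 1) ((p:ℤ) - 1) = (G:ℤ) := by
          have hpe1 : 1 ≤ p ^ (e+1) := Nat.one_le_pow _ _ (by omega)
          have h1 : ((p * p ^ e : ℕ) : ℤ) - 1 = ((p ^ (e+1) - 1 : ℕ) : ℤ) := by
            rw [Nat.cast_sub hpe1]; push_cast; ring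
          have h2 : ((p:ℤ) - 1) = ((p - 1 : ℕ) : ℤ) := by
            rw [Nat.cast_sub (by omega)]; norm_num
          rw [h1, h2, PySem.Int.floordiv_natCast]
          congr 1
          rw [← geom_mul p e (by omega), Nat.mul_div_cancel_left _ (by omega)]
        rw [hfd, show ((p:ℤ) + 1) = ((p + 1 : ℕ) : ℤ) by push_cast; ring]
        have h2a : 2 * a ≤ k := by
          have hpe : p ≤ p ^ e := Nat.le_self_pow (by omega) p
          have : p * a ≤ p ^ e * a := Nat.mul_le_mul_right a hpe
          nlinarith
        have hfac' : ∀ r, r.Prime → r < p + 1 → ¬ r ∣ a := by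
          intro r hr hrlt hra
          rcases Nat.lt_or_ge r p with h | h
          · exact hfac r hr h (hra.trans ⟨p ^ e, by rw [hka]; ring⟩)
          · have : r = p := by omega
            subst this
            exact hna hra
        rw [IH (p+1) a (sigma * (G:ℤ)) (by omega) (by omega) ha1 hfac']
        have hcop : Nat.Coprime (p ^ e) a :=
          Nat.Coprime.pow_left e ((Nat.Prime.coprime_iff_not_dvd hppr).mpr hna)
        have hσ : ∑ d ∈ k.divisors, d = (∑ d ∈ (p ^ e).divisors, d) * (∑ d ∈ a.divisors, d) := by
          rw [hka]
          exact Nat.Coprime.sum_divisors_mul hcop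
        rw [hσ, Nat.sum_divisors_prime_pow hppr (f := fun d => d), ← hG, Nat.cast_mul]
        ring
      · have hmodF : ¬ ((PySem.Int.mod (k:ℤ) (p:ℤ) == 0) = true) := by
          rw [beq_iff_eq, PySem.Int.mod_eq_zero_iff_dvd]
          exact fun h => hdvd (by exact_mod_cast h)
        rw [if_neg hmodF, show ((p:ℤ) + 1) = ((p + 1 : ℕ) : ℤ) by push_cast; ring]
        refine IH (p+1) k sigma (by omega) (by omega) hk ?_
        intro r hr hrlt hra
        rcases Nat.lt_or_ge r p with h | h
        · exact hfac r hr h hra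
        · have : r = p := by omega
          subst this
          exact hdvd hra
    · rw [if_neg (show ¬ ((p:ℤ) * (p:ℤ) ≤ (k:ℤ)) by exact_mod_cast hstop)]
      exact sigma_exit p k sigma hk (by omega) hfac

theorem sigmaLoop_sigma (p k : ℕ) (sigma : ℤ) (hp : 2 ≤ p) (hk : 1 ≤ k)
    (hfac : ∀ r : ℕ, r.Prime → r < p → ¬ r ∣ k) :
    finishSigma (sigmaLoop ↑p ↑k sigma) = sigma * ↑(∑ d ∈ k.divisors, d) := by
  unfold sigmaLoop
  have htn : ((k:ℤ) + 2 - (p:ℤ)).toNat = k + 2 - p := by omega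
  rw [htn]
  exact sigmaLoopF_sigma (k + 2 - p) p k sigma (le_refl _) hp hk hfac

-- ===== VERDICT =====
theorem classify_number_spec : Claim_equal_classify_number := by
  intro n _ hpre
  show classify_number n = classify_number_alt n
  lift n to ℕ using hpre with m
  rcases (show m = 0 ∨ m = 1 ∨ 2 ≤ m by omega) with h0 | h1 | hm
  · subst h0; simp only [Nat.cast_zero]; decide
  · subst h1; simp only [Nat.cast_one]; decide
  · have hpos : (0:ℤ) < (m:ℤ) := by exact_mod_cast (show 0 < m by omega)
    rw [classify_number, if_pos hpos, classify_number_alt,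
        if_neg (show ¬ (((m:ℤ) == 0) = true) by simp; omega)]
    unfold classifyRestA
    set prop := ∑ d ∈ m.properDivisors, d with hprop
    have hσprop : (∑ d ∈ m.divisors, d) = prop + m :=
      Nat.sum_divisors_eq_sum_properDivisors_add_self
    have hsig : finishSigma (sigmaLoop 2 (m:ℤ) 1) = ((prop + m : ℕ) : ℤ) := by
      rw [show (2:ℤ) = ((2:ℕ):ℤ) by norm_num,
          sigmaLoop_sigma 2 m 1 (by omega) (by omega)
            (fun r hr hlt => absurd hr.two_le (by omega)),
          hσprop]
      ring
    have hBs : finishSigma (sigmaLoop 2 (m:ℤ) 1) - (m:ℤ) = ((prop : ℕ) : ℤ) := by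
      rw [hsig]; push_cast; ring
    have hA_sum : (PySem.List.pyRange 2 (pyIsqrt (m:ℤ) + 1) 1).foldl
        (fun s i => if PySem.Int.mod (m:ℤ) i == 0 then
            if PySem.Int.floordiv (m:ℤ) i ≠ i then s + i + PySem.Int.floordiv (m:ℤ) i else s + i
          else s) 1 = ((prop : ℕ) : ℤ) := by
      rw [A_fold_sum m hm, Ico_propSum]
    have hpb : is_prime (m:ℤ) = (((prop : ℕ) : ℤ) == 1) := by
      rw [Bool.eq_iff_iff, is_prime_true_iff m hm, beq_iff_eq]
      rw [show (((prop:ℕ):ℤ) = 1 ↔ prop = 1) by exact_mod_cast Iff.rfl]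
      exact Nat.sum_properDivisors_eq_one_iff_prime.symm
    have h1 : ((m:ℤ) == 1) = false := by simp; omega
    simp only [hpb, hA_sum, h1, Bool.false_eq_true, if_false, if_pos hpos]
    rw [show (if (sigmaLoop 2 (m:ℤ) 1).1 > 1 then
          (sigmaLoop 2 (m:ℤ) 1).2 * ((sigmaLoop 2 (m:ℤ) 1).1 + 1)
        else (sigmaLoop 2 (m:ℤ) 1).2) = finishSigma (sigmaLoop 2 (m:ℤ) 1) from rfl, hBs]
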